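-- pv_equiv track=rewrite | github.com/Inkmptnz/Liars-Dice | liarsDice.py | dice_options
-- ===== SOURCE A (Python) =====
-- def dice_options(last_bet, dice_count_game):
--     dice_permutation = []
--
--     if last_bet == (-1,-1):
--         for count in range(1, dice_count_game + 1):
--             for dice in range(1, 7):
--                 dice_permutation.append((count, dice))
--         return dice_permutation
--
--     for dice in range(last_bet[1] + 1, 7):
--         dice_permutation.append((last_bet[0], dice))
--
--     for count in range(last_bet[0] + 1, dice_count_game + 1):
--         for dice in range(1, 7):
--             dice_permutation.append((count, dice))
--     return dice_permutation
-- ===== SOURCE B (Python) =====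
-- def dice_options(last_bet, dice_count_game):
--     if last_bet == (-1, -1):
--         n = 6 * (dice_count_game if dice_count_game > 0 else 0)
--         return [(i // 6 + 1, i % 6 + 1) for i in range(n)]
--     count, face = last_bet
--     row = 6 - face if face < 6 else 0
--     grid = 6 * (dice_count_game - count) if count < dice_count_game else 0
--     return [(count, face + 1 + i) if i < row else
--             ((i - row) // 6 + count + 1, (i - row) % 6 + 1)
--             for i in range(row + grid)]
-- ===== Notes on version B (the rewrite author's own statement) =====
-- stated objective: alternative
-- what changed: Replaced A's special-cased branch for the (-1,-1) sentinel and its two directed nested range-loops by a single linear-index scan: B computes the row and grid segment lengths in closed form and maps one flat range through divmod to produce each bet, with no nested loops and no appended-accumulator.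
import Mathlib
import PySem

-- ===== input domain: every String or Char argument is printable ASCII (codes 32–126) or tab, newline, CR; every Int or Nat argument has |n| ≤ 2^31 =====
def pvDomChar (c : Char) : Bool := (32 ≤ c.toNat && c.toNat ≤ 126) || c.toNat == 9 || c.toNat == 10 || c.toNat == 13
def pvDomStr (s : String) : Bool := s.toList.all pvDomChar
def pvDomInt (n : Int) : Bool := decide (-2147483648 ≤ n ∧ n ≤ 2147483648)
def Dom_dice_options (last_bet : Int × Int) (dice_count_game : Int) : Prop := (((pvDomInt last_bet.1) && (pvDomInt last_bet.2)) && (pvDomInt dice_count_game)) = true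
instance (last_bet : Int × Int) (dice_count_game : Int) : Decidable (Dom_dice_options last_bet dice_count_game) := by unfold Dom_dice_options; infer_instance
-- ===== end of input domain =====

-- ===== PORT A =====
-- B re-enumerates the bet grid by a single linear index with divmod instead of A's
-- special-cased nested range loops; objective: alternative (same cost, different algorithm).
def dice_options (last_bet : Int × Int) (dice_count_game : Int) : List (Int × Int) :=
  let dice_permutation : List (Int × Int) := []
  if last_bet = (-1, -1) then
    (PySem.List.pyRange 1 (dice_count_game + 1) 1).foldl
      (fun acc count =>
        (PySem.List.pyRange 1 7 1).foldl (fun acc2 dice => acc2 ++ [(count, dice)]) acc)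
      dice_permutation
  else
    let p1 := (PySem.List.pyRange (last_bet.2 + 1) 7 1).foldl
      (fun acc dice => acc ++ [(last_bet.1, dice)]) dice_permutation
    (PySem.List.pyRange (last_bet.1 + 1) (dice_count_game + 1) 1).foldl
      (fun acc count =>
        (PySem.List.pyRange 1 7 1).foldl (fun acc2 dice => acc2 ++ [(count, dice)]) acc)
      p1

-- ===== PORT B =====
def dice_options_alt (last_bet : Int × Int) (dice_count_game : Int) : List (Int × Int) :=
  if last_bet = (-1, -1) then
    let n := 6 * (if dice_count_game > 0 then dice_count_game else 0)
    (PySem.List.pyRange 0 n 1).map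
      (fun i => (PySem.Int.floordiv i 6 + 1, PySem.Int.mod i 6 + 1))
  else
    let count := last_bet.1
    let face := last_bet.2
    let row : Int := if face < 6 then 6 - face else 0
    let grid : Int := if count < dice_count_game then 6 * (dice_count_game - count) else 0
    (PySem.List.pyRange 0 (row + grid) 1).map
      (fun i =>
        if i < row then (count, face + 1 + i)
        else (PySem.Int.floordiv (i - row) 6 + count + 1, PySem.Int.mod (i - row) 6 + 1))

-- ===== PRECONDITION & SPEC =====
def Spec_dice_options (last_bet : Int × Int) (dice_count_game : Int) (out : List (Int × Int)) : Prop := out = dice_options_alt last_bet dice_count_game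
instance (last_bet : Int × Int) (dice_count_game : Int) (out : List (Int × Int)) : Decidable (Spec_dice_options last_bet dice_count_game out) := by unfold Spec_dice_options; infer_instance

-- ===== CLAIM (what is proved, stated in full; the proofs are below) =====
def Claim_equal_dice_options : Prop := ∀ (last_bet : Int × Int) (dice_count_game : Int), Dom_dice_options last_bet dice_count_game → Spec_dice_options last_bet dice_count_game (dice_options last_bet dice_count_game)

-- ===== LEMMAS AND PROOFS =====
lemma fd6 (q a : Int) (h1 : 6*q ≤ a) (h2 : a < 6*q+6) : PySem.Int.floordiv a 6 = q := by
  rw [PySem.Int.floordiv_eq_iff_of_pos (by norm_num)]; omega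

lemma md6 (q a : Int) (h1 : 6*q ≤ a) (h2 : a < 6*q+6) : PySem.Int.mod a 6 = a - 6*q := by
  have hf := fd6 q a h1 h2
  have := PySem.Int.floordiv_mul_add_mod a 6
  omega

lemma grid_lemma (c0 : Int) (m : Nat) :
    (List.range (6*m)).map
      (fun (k : Nat) => (PySem.Int.floordiv (k : Int) 6 + c0 + 1, PySem.Int.mod (k : Int) 6 + 1))
    = (PySem.List.pyRange (c0+1) (c0+1+(m : Int)) 1).flatMap
        (fun c => (PySem.List.pyRange 1 7 1).map (fun d => (c, d))) := by
  induction m with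
  | zero => simp
  | succ n ih =>
    have h6 : 6*(n+1) = 6*n + 6 := by ring
    rw [h6, List.range_add, List.map_append, List.map_map, ih]
    have hr : (((n:Nat)+1 : Nat) : Int) = (n : Int) + 1 := by push_cast; ring
    rw [hr, show c0 + 1 + ((n:Int)+1) = (c0 + 1 + (n:Int)) + 1 by ring,
        PySem.List.pyRange_one_succ_right (by omega), List.flatMap_append]
    congr 1
    simp only [List.flatMap_cons, List.flatMap_nil, List.append_nil]
    have e : PySem.List.pyRange 1 7 1 = [1,2,3,4,5,6] := by decide
    have er : List.range 6 = [0,1,2,3,4,5] := by decide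
    rw [e, er]
    simp only [List.map_cons, List.map_nil, Function.comp]
    have f0 := fd6 (n:Int) ((((6*n+0 : Nat)):Int)) (by push_cast; omega) (by push_cast; omega)
    have f1 := fd6 (n:Int) ((((6*n+1 : Nat)):Int)) (by push_cast; omega) (by push_cast; omega)
    have f2 := fd6 (n:Int) ((((6*n+2 : Nat)):Int)) (by push_cast; omega) (by push_cast; omega)
    have f3 := fd6 (n:Int) ((((6*n+3 : Nat)):Int)) (by push_cast; omega) (by push_cast; omega)
    have f4 := fd6 (n:Int) ((((6*n+4 : Nat)):Int)) (by push_cast; omega) (by push_cast; omega)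
    have f5 := fd6 (n:Int) ((((6*n+5 : Nat)):Int)) (by push_cast; omega) (by push_cast; omega)
    have m0 := md6 (n:Int) ((((6*n+0 : Nat)):Int)) (by push_cast; omega) (by push_cast; omega)
    have m1 := md6 (n:Int) ((((6*n+1 : Nat)):Int)) (by push_cast; omega) (by push_cast; omega)
    have m2 := md6 (n:Int) ((((6*n+2 : Nat)):Int)) (by push_cast; omega) (by push_cast; omega)
    have m3 := md6 (n:Int) ((((6*n+3 : Nat)):Int)) (by push_cast; omega) (by push_cast; omega)
    have m4 := md6 (n:Int) ((((6*n+4 : Nat)):Int)) (by push_cast; omega) (by push_cast; omega)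
    have m5 := md6 (n:Int) ((((6*n+5 : Nat)):Int)) (by push_cast; omega) (by push_cast; omega)
    rw [f0, f1, f2, f3, f4, f5, m0, m1, m2, m3, m4, m5]
    push_cast
    norm_num
    omega

lemma map_range_pyRange {α : Type} (a b : Int) (f : Int → α) :
    (PySem.List.pyRange a b 1).map f
      = (List.range (b-a).toNat).map (fun (k : Nat) => f (a + (k:Int))) := by
  rw [PySem.List.pyRange_one, List.map_map]; rfl

lemma AB_eq (last_bet : Int × Int) (dcg : Int) :
    dice_options last_bet dcg = dice_options_alt last_bet dcg := by
  obtain ⟨count, face⟩ := last_bet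
  by_cases hs : ((count, face) : Int × Int) = ((-1 : Int), (-1 : Int))
  · simp only [dice_options, dice_options_alt, if_pos hs]
    simp only [PySem.List.foldl_append_singleton_eq_map]
    rw [PySem.List.foldl_append_eq_flatMap, List.nil_append]
    have hn : (if dcg > 0 then dcg else 0) = ((dcg.toNat : Nat) : Int) := by
      split <;> omega
    rw [hn, show (6 : Int) * ((dcg.toNat : Nat) : Int) = ((6 * dcg.toNat : Nat) : Int) by push_cast; ring]
    rw [map_range_pyRange]
    have g := grid_lemma 0 dcg.toNat
    simp only [add_zero, zero_add] at g ⊢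
    rw [show ((6*dcg.toNat : Nat) : Int) - 0 = ((6*dcg.toNat : Nat) : Int) by ring,
        Int.toNat_natCast, g]
    by_cases h : dcg ≤ 0
    · rw [PySem.List.pyRange_one_eq_nil (a := 1) (b := dcg + 1) (by omega),
          PySem.List.pyRange_one_eq_nil (a := 1) (b := 1 + (dcg.toNat : Int)) (by omega)]
    · push Not at h
      rw [show (1 : Int) + (dcg.toNat : Int) = dcg + 1 by omega]
  · simp only [dice_options, dice_options_alt, if_neg hs]
    simp only [PySem.List.foldl_append_singleton_eq_map]
    rw [PySem.List.foldl_append_eq_flatMap, List.nil_append]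
    set r : Int := if face < 6 then 6 - face else 0 with hr
    set g : Int := if count < dcg then 6 * (dcg - count) else 0 with hg
    have hr0 : 0 ≤ r := by rw [hr]; split <;> omega
    have hg0 : 0 ≤ g := by rw [hg]; split <;> omega
    rw [PySem.List.pyRange_one_append 0 r (r+g) hr0 (by omega), List.map_append]
    congr 1
    · -- row part
      rw [map_range_pyRange, map_range_pyRange]
      by_cases hf : face < 6
      · have hrv : r = 6 - face := by rw [hr, if_pos hf]
        rw [show (r - 0).toNat = (7 - (face+1)).toNat by omega]
        apply List.map_congr_left
        intro k hk
        rw [List.mem_range] at hk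
        have hk' : (k : Int) < 7 - (face+1) := by omega
        rw [if_pos (by omega : (0 : Int) + (k:Int) < r)]
        norm_num
      · have hrv : r = 0 := by rw [hr, if_neg hf]
        rw [show (r - 0).toNat = 0 by omega, show (7 - (face+1)).toNat = 0 by omega]
        simp
    · -- grid part
      rw [map_range_pyRange]
      rw [show (r + g - r).toNat = g.toNat by omega]
      have step : (List.range g.toNat).map
          (fun (k:Nat) => if r + (k:Int) < r then (count, face + 1 + (r + (k:Int)))
            else (PySem.Int.floordiv (r + (k:Int) - r) 6 + count + 1,
                  PySem.Int.mod (r + (k:Int) - r) 6 + 1))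
          = (List.range g.toNat).map
            (fun (k:Nat) => (PySem.Int.floordiv (k:Int) 6 + count + 1,
                             PySem.Int.mod (k:Int) 6 + 1)) := by
        apply List.map_congr_left
        intro k hk
        rw [if_neg (by omega), show r + (k:Int) - r = (k:Int) by ring]
      rw [step]
      have hm : g.toNat = 6 * (dcg - count).toNat := by
        rw [hg]; split <;> omega
      rw [hm, grid_lemma count ((dcg - count).toNat)]
      by_cases h : dcg ≤ count
      · rw [PySem.List.pyRange_one_eq_nil (a := count + 1) (b := dcg + 1) (by omega),
            PySem.List.pyRange_one_eq_nil (a := count + 1) (b := count + 1 + ((dcg - count).toNat : Int)) (by omega)]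
      · push Not at h
        rw [show count + 1 + ((dcg - count).toNat : Int) = dcg + 1 by omega]

-- ===== VERDICT (by name: the statement is the Claim_ definition above) =====
theorem dice_options_spec : Claim_equal_dice_options := by
  intro last_bet dice_count_game _
  unfold Spec_dice_options
  exact AB_eq last_bet dice_count_game
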